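-- pv_equiv track=rewrite | github.com/2012monk/Algorithm | algo-py/baekjoon/2493/main.7-29.py | solution
-- ===== SOURCE A (Python) =====
-- def solution(towers):
--
--     st = []
--     b = [0] * len(towers)
--
--     for i, v in enumerate(towers):
--
--         while st and towers[st[-1]] < v:
--             st.pop()
--
--         if st:
--             b[i] = st[-1] + 1
--         st.append(i)
--     return b
-- ===== SOURCE B (Python) =====
-- def solution(towers):
--     def nearest(i):
--         v = towers[i]
--         for j in range(i - 1, -1, -1):
--             if towers[j] >= v:
--                 return j + 1
--         return 0
--     return [nearest(i) for i in range(len(towers))]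
-- ===== Notes on version B (the rewrite author's own statement) =====
-- stated objective: alternative
-- what changed: Replaces the monotonic index stack (amortized single pass with pop-while state) by a stateless per-element backward scan that returns at the first tower of height >= the current one.
import Mathlib
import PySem

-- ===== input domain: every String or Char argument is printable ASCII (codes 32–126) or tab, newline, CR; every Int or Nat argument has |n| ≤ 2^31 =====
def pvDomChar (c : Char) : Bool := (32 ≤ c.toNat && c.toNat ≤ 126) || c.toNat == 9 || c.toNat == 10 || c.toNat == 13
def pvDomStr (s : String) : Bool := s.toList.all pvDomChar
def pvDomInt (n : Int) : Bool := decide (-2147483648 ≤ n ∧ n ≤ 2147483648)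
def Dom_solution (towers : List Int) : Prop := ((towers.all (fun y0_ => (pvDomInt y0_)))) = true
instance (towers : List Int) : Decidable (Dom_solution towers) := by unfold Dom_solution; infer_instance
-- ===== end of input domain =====

-- B replaces A's monotonic index stack by a stateless backward scan per element (alternative
-- decomposition, same return value; B is quadratic, not faster).

-- ===== PORT A =====
-- 'while st and towers[st[-1]] < v: st.pop()' ; st is kept head = top. Indices pushed on the
-- stack are always in range, so towers[st[-1]] is read with pyGetD (exact here).
def popA (towers : List Int) (v : Int) : List Int → List Int
  | [] => []
  | j :: rest => if PySem.List.pyGetD towers j 0 < v then popA towers v rest else j :: rest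

-- 'if st: b[i] = st[-1] + 1'
def writeA (b : List Int) (i : Int) : List Int → List Int
  | [] => b
  | j :: _ => PySem.List.pySetD b i (j + 1)

-- the 'for i, v in enumerate(towers)' loop, state (st, b)
def loopA (towers : List Int) : List (Int × Int) → List Int × List Int → List Int × List Int
  | [], s => s
  | (i, v) :: rest, (st, b) =>
    let st' := popA towers v st
    loopA towers rest (i :: st', writeA b i st')

def solution (towers : List Int) : List Int :=
  (loopA towers (PySem.List.enumerate towers 0) ([], List.replicate towers.length 0)).2

-- ===== PORT B =====
-- 'for j in range(i-1, -1, -1): if towers[j] >= v: return j+1' ; j counts down from i-1.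
-- All indices read are in range, so towers[j] is read with pyGetD (exact here).
def goB (towers : List Int) (v : Int) : Nat → Int
  | 0 => 0
  | j + 1 => if v ≤ PySem.List.pyGetD towers (j : Int) 0 then (j : Int) + 1 else goB towers v j

def solution_alt (towers : List Int) : List Int :=
  (List.range towers.length).map (fun (i : Nat) => goB towers (PySem.List.pyGetD towers (i : Int) 0) i)

-- ===== PRECONDITION & SPEC =====
def Spec_solution (towers : List Int) (out : List Int) : Prop := out = solution_alt towers
instance (towers : List Int) (out : List Int) : Decidable (Spec_solution towers out) := by unfold Spec_solution; infer_instance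

-- ===== CLAIM (what is proved, stated in full; the proofs are below) =====
def Claim_equal_solution : Prop := ∀ (towers : List Int), Dom_solution towers → Spec_solution towers (solution towers)

-- ===== LEMMAS AND PROOFS =====

-- the value A writes at step i: top of the popped stack, +1 (0 if empty)
def hd0 : List Int → Int
  | [] => 0
  | j :: _ => j + 1

lemma popA_popA (towers : List Int) (v w : Int) (h : w ≤ v) (st : List Int) :
    popA towers v (popA towers w st) = popA towers v st := by
  induction st with
  | nil => rfl
  | cons j rest ih =>
    by_cases hj : PySem.List.pyGetD towers j 0 < w
    · have hv : PySem.List.pyGetD towers j 0 < v := lt_of_lt_of_le hj h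
      simp [popA, hj, hv, ih]
    · simp [popA, hj]

lemma take_succ_set (b : List Int) (m : Nat) (y : Int) (h : m < b.length) :
    (b.set m y).take (m + 1) = b.take m ++ [y] := by
  have hlen : (List.take m b).length = m := by simp; omega
  apply List.ext_getElem
  · simp; omega
  · intro i h1 h2
    by_cases hi : i < m
    · rw [List.getElem_append_left (by omega)]
      simp [List.getElem_take, Nat.ne_of_gt hi]
    · have him : i = m := by simp at h1; omega
      subst him
      rw [List.getElem_append_right (by omega)]
      simp [hlen]

lemma writeA_eq (b : List Int) (m : Nat) (st1 : List Int) (hm : m < b.length)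
    (hbm : b[m] = 0) : writeA b (m : Int) st1 = b.set m (hd0 st1) := by
  cases st1 with
  | nil =>
    show b = b.set m (hd0 [])
    apply List.ext_getElem
    · simp
    · intro i hi1 hi2
      rw [List.getElem_set]
      split
      · next he => simp [hd0, ← he, hbm]
      · rfl
  | cons j rest => simp [writeA, hd0, PySem.List.pySetD_natCast]

lemma loopA_main (towers : List Int) : ∀ (l : List Int) (m : Nat) (st b : List Int),
    towers.drop m = l →
    (∀ v, hd0 (popA towers v st) = goB towers v m) →
    b.length = towers.length →
    (∀ i (h : i < b.length), m ≤ i → b[i] = 0) →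
    (loopA towers (PySem.List.enumerate l (m : Int)) (st, b)).2
      = b.take m ++ (List.range' m l.length).map
          (fun (i : Nat) => goB towers (PySem.List.pyGetD towers (i : Int) 0) i) := by
  intro l
  induction l with
  | nil =>
    intro m st b hdrop _ hlen _
    have hm : towers.length ≤ m := by
      by_contra hc
      have := List.length_drop (l := towers) (i := m)
      rw [hdrop] at this; simp at this; omega
    simp [PySem.List.enumerate, loopA, List.take_of_length_le (le_trans (le_of_eq hlen) hm)]
  | cons x xs ih =>
    intro m st b hdrop hinv hlen hz
    have hmlt : m < towers.length := by
      by_contra hc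
      rw [List.drop_eq_nil_of_le (by omega)] at hdrop; simp at hdrop
    have hx : towers[m] = x := by
      have h2 : towers[m]? = some x := by
        rw [← List.head?_drop, hdrop]; rfl
      rw [List.getElem?_eq_getElem hmlt] at h2
      exact Option.some.inj h2
    have hgetm : PySem.List.pyGetD towers (m : Int) 0 = x := by
      rw [PySem.List.pyGetD_natCast]
      simp [List.getD, hmlt, hx]
    have hdrop' : towers.drop (m + 1) = xs := by
      have : (towers.drop m).tail = xs := by rw [hdrop]; rfl
      rwa [List.tail_drop] at this
    -- unfold one loop step
    rw [PySem.List.enumerate_cons]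
    show (loopA towers (((m : Int), x) :: PySem.List.enumerate xs ((m : Int) + 1)) (st, b)).2 = _
    rw [loopA]
    set st1 := popA towers x st with hst1
    have hhd : hd0 st1 = goB towers x m := hinv x
    rw [writeA_eq b m st1 (by omega) (hz m (by omega) (le_refl m)), hhd]

    have hcast : ((m : Int) + 1) = ((m + 1 : Nat) : Int) := by push_cast; ring
    rw [hcast]
    have hlen' : (b.set m (goB towers x m)).length = towers.length := by simp [hlen]
    have hz' : ∀ i (h : i < (b.set m (goB towers x m)).length), m + 1 ≤ i →
        (b.set m (goB towers x m))[i] = 0 := by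
      intro i hi hge
      rw [List.getElem_set]
      split
      · next he => omega
      · exact hz i (by simpa using hi) (by omega)
    have hinv' : ∀ v, hd0 (popA towers v ((m : Int) :: st1)) = goB towers v (m + 1) := by
      intro v
      by_cases hv : PySem.List.pyGetD towers (m : Int) 0 < v
      · have h1 : popA towers v ((m : Int) :: st1) = popA towers v st1 := by
          rw [popA, if_pos hv]
        rw [h1, hst1, popA_popA towers v x (by rw [hgetm] at hv; exact le_of_lt hv),
          hinv v, goB, if_neg (not_le.mpr hv)]
      · have h1 : popA towers v ((m : Int) :: st1) = (m : Int) :: st1 := by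
          rw [popA, if_neg hv]
        rw [h1, goB, if_pos (not_lt.mp hv)]
        rfl
    rw [ih (m + 1) ((m : Int) :: st1) (b.set m (goB towers x m)) hdrop' hinv' hlen' hz']
    rw [List.length_cons, List.range'_succ, List.map_cons]
    rw [take_succ_set b m _ (by omega)]
    simp [hgetm]

theorem solution_eq_alt (towers : List Int) : solution towers = solution_alt towers := by
  unfold solution solution_alt
  have h := loopA_main towers towers 0 [] (List.replicate towers.length 0) rfl
      (fun v => rfl) (by simp) (by intro i h _; simp)
  simp only [Nat.cast_zero] at h
  rw [h]
  simp [List.range_eq_range']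

-- ===== VERDICT (by name: the statement is the Claim_ definition above) =====
theorem solution_spec : Claim_equal_solution := by
  intro towers _
  unfold Spec_solution
  exact solution_eq_alt towers
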